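-- pv_equiv track=rewrite | github.com/ldct/cp | atcoder/abc199/D/D.py | ans_fast
-- ===== SOURCE A (Python) =====
-- def ans_fast(N, M, edges):
--
--     neighbours = {}
--     for i in range(N):
--         neighbours[i] = []
--
--     for a, b in edges:
--         neighbours[a] += [b]
--         neighbours[b] += [a]
--
--
--     def num_ways(t, i, colouring):
--
--         valid = set("RGB")
--
--         u = t[i]
--
--         for v in neighbours[u]:
--             if v in colouring and colouring[v] in valid:
--                 valid.remove(colouring[v])
--
--         if i+1 >= len(t): return len(valid)
--
--         ret = 0
--
--         for c in valid:
--             new_colouring = dict(colouring)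
--             new_colouring[u] = c
--
--             ret += num_ways(t, i+1, new_colouring)
--
--         return ret
--
--     visited = set()
--
--     def traverse(u, visited):
--         visited.append(u)
--         for v in neighbours[u]:
--             if v in visited: continue
--             traverse(v, visited)
--         return visited
--
--     ret = 1
--
--     for u in range(N):
--         if u in visited: continue
--         t = traverse(u, [])
--         ret *= num_ways(t, 0, dict())
--         for v in t: visited.add(v)
--
--     return ret
-- ===== SOURCE B (Python) =====
-- def ans_fast(N, M, edges):
--     adj = [[] for _ in range(N)]
--     for a, b in edges:
--         adj[a].append(b)
--         adj[b].append(a)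
--
--     color = [-1] * N
--     seen = [False] * max(N, 0)
--
--     def count(order, i):
--         if i >= len(order):
--             return 1
--         u = order[i]
--         total = 0
--         for c in (0, 1, 2):
--             ok = True
--             for v in adj[u]:
--                 if color[v] == c:
--                     ok = False
--                     break
--             if ok:
--                 color[u] = c
--                 total += count(order, i + 1)
--         color[u] = -1
--         return total
--
--     result = 1
--     for s in range(N):
--         if seen[s]:
--             continue
--         order = [s]
--         seen[s] = True
--         head = 0
--         while head < len(order):
--             u = order[head]
--             head += 1
--             for v in adj[u]:
--                 if not seen[v]:
--                     seen[v] = True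
--                     order.append(v)
--         result *= count(order, 0)
--     return result
-- ===== Notes on version B (the rewrite author's own statement) =====
-- stated objective: alternative
-- what changed: A's recursive DFS (mutating a shared visited list) plus a counting recursion that copies the whole colouring dict at every node is replaced by an iterative BFS queue per component and a backtracking counter over a single mutable colour array with an early-exit neighbour scan; only the return value is compared (neither implementation mutates its arguments).
import Mathlib
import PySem

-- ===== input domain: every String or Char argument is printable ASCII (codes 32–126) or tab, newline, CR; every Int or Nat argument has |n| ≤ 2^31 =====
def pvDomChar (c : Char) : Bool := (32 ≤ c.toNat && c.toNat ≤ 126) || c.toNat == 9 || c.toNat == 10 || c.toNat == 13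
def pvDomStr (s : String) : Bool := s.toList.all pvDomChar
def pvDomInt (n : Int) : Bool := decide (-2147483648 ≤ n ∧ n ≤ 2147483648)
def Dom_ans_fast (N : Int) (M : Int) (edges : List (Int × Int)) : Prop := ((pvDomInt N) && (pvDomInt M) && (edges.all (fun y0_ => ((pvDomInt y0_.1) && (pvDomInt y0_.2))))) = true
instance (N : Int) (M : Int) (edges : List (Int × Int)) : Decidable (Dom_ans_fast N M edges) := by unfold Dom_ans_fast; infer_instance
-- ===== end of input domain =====

-- B replaces A's recursive DFS + dict-copying recursive counter by an iterative BFS queue over each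
-- component and a backtracking counter on one mutable color array (objective: an alternative
-- structure of similar cost; the return value is proved equal on all inputs where A returns,
-- i.e. all edges inside range(N); neither implementation mutates its arguments).

-- ===== PORT A =====
-- transliteration of A's num_ways; `i` is kept as a Nat (it starts at 0 and only grows);
-- `t.getD i 0` is Python's t[i], exact on every reachable call (0 ≤ i < len(t));
-- the fuel argument only makes the recursion structural and never runs out on reachable calls.
def numWaysA (nb : PySem.Dict Int (List Int)) (t : List Int) : Nat → Nat → PySem.Dict Int Char → Int
  | 0, _, _ => 0
  | fuel+1, i, col =>
    let u := t.getD i 0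
    let valid : PySem.Set Char := (nb.getD u []).foldl (fun s v =>
        match col.get? v with
        | some cv => if s.contains cv then PySem.Set.discard s cv else s
        | none => s) (PySem.Set.ofList ("RGB".toList))
    if t.length ≤ i + 1 then (PySem.Set.len valid : Int)
    else valid.foldl (fun ret c => ret + numWaysA nb t fuel (i+1) (col.insert u c)) 0

-- transliteration of A's traverse (the visited list is threaded through the loop, as in Python);
-- fuel only makes the recursion structural (the recursion depth is at most N on reachable calls)
def traverseA (nb : PySem.Dict Int (List Int)) : Nat → Int → List Int → List Int
  | 0, u, vis => vis ++ [u]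
  | fuel+1, u, vis =>
    let vis := vis ++ [u]
    (nb.getD u []).foldl (fun vis v => if vis.contains v then vis else traverseA nb fuel v vis) vis

-- A's `neighbours` dict: keys 0..N-1 ↦ [], then `neighbours[a] += [b]; neighbours[b] += [a]`
-- (the getD default is never taken under Pre_, where both keys are present)
def buildNbA (N : Int) (edges : List (Int × Int)) : PySem.Dict Int (List Int) :=
  edges.foldl (fun d ab =>
      let d := d.insert ab.1 (d.getD ab.1 [] ++ [ab.2])
      d.insert ab.2 (d.getD ab.2 [] ++ [ab.1]))
    ((PySem.List.pyRange 0 N 1).foldl (fun d i => d.insert i []) PySem.Dict.empty)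

def ans_fast (N : Int) (M : Int) (edges : List (Int × Int)) : Int :=
  let nb := buildNbA N edges
  ((PySem.List.pyRange 0 N 1).foldl (fun (st : PySem.Set Int × Int) u =>
      if PySem.Set.contains st.1 u then st
      else
        let t := traverseA nb (N.toNat + 1) u []
        let r := st.2 * numWaysA nb t t.length 0 PySem.Dict.empty
        (t.foldl (fun s v => PySem.Set.add s v) st.1, r))
    (PySem.Set.empty, 1)).2

-- ===== PORT B =====
-- transliteration of Source B's count; the Python mutates (and finally restores) the single `color`
-- array, so the port threads the array functionally — every call sees the same array values.
-- All Int indices are nonnegative and in bounds on reachable calls (Pre_), so `.toNat`/getD are exact.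
def countB (adj : List (List Int)) (order : List Int) : Nat → Nat → List Int → Int
  | 0, _, _ => 1
  | fuel+1, i, color =>
    if order.length ≤ i then 1
    else
      let u := order.getD i 0
      ([0, 1, 2] : List Int).foldl (fun total c =>
        if (adj.getD u.toNat []).any (fun v => color.getD v.toNat 0 == c) then total
        else total + countB adj order fuel (i+1) (color.set u.toNat c)) 0

-- transliteration of Source B's BFS while-loop (state: order, head, seen); fuel is only structural
def bfsB (adj : List (List Int)) : Nat → List Int → Nat → List Bool → (List Int × List Bool)
  | 0, order, _, seen => (order, seen)
  | fuel+1, order, head, seen =>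
    if order.length ≤ head then (order, seen)
    else
      let u := order.getD head 0
      let os := (adj.getD u.toNat []).foldl (fun (os : List Int × List Bool) v =>
          if os.2.getD v.toNat false then os
          else (os.1 ++ [v], os.2.set v.toNat true)) (order, seen)
      bfsB adj fuel os.1 (head+1) os.2

-- Source B's adjacency list (adj[a].append(b); adj[b].append(a)); indices in range under Pre_
def buildAdjB (N : Int) (edges : List (Int × Int)) : List (List Int) :=
  edges.foldl (fun L ab =>
      let L := L.set ab.1.toNat ((L.getD ab.1.toNat []) ++ [ab.2])
      L.set ab.2.toNat ((L.getD ab.2.toNat []) ++ [ab.1]))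
    ((PySem.List.pyRange 0 N 1).map (fun _ => ([] : List Int)))

def ans_fast_alt (N : Int) (M : Int) (edges : List (Int × Int)) : Int :=
  let adj := buildAdjB N edges
  ((PySem.List.pyRange 0 N 1).foldl (fun (st : List Bool × Int) s =>
      if st.1.getD s.toNat false then st
      else
        let os := bfsB adj (N.toNat + 1) [s] 0 (st.1.set s.toNat true)
        (os.2, st.2 * countB adj os.1 (os.1.length + 1) 0 (List.replicate N.toNat (-1))))
    (List.replicate (max N 0).toNat false, 1)).2

-- ===== PRECONDITION & SPEC =====
-- Pre_: both endpoints of every edge lie in range(N) — exactly the inputs on which A returns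
-- (otherwise A raises KeyError on `neighbours[a] += [b]`).
def Pre_ans_fast (N : Int) (M : Int) (edges : List (Int × Int)) : Prop :=
  ∀ p ∈ edges, 0 ≤ p.1 ∧ p.1 < N ∧ 0 ≤ p.2 ∧ p.2 < N
instance (N : Int) (M : Int) (edges : List (Int × Int)) : Decidable (Pre_ans_fast N M edges) := by
  unfold Pre_ans_fast; infer_instance

def pvWitness_ans_fast : Int × Int × (List (Int × Int)) := (3, 2, [(0, 1), (1, 2)])

def Spec_ans_fast (N : Int) (M : Int) (edges : List (Int × Int)) (out : Int) : Prop := out = ans_fast_alt N M edges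
instance (N : Int) (M : Int) (edges : List (Int × Int)) (out : Int) : Decidable (Spec_ans_fast N M edges out) := by unfold Spec_ans_fast; infer_instance

-- ===== CLAIM (what is proved, stated in full; the proofs are below) =====
def Claim_equal_ans_fast : Prop := ∀ (N : Int) (M : Int) (edges : List (Int × Int)), Dom_ans_fast N M edges → Pre_ans_fast N M edges → Spec_ans_fast N M edges (ans_fast N M edges)

-- ===== LEMMAS AND PROOFS =====

-- The abstract object both ports are reduced to: `sc nbr cs vs σ` counts the ways to extend the
-- partial coloring σ to the vertices of vs (in order), each vertex avoiding the colors σ/earlier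
-- choices give to its neighbours.
def scAllowed {γ : Type} [DecidableEq γ] (nbr : Int → List Int) (cs : List γ)
    (σ : Int → Option γ) (u : Int) : List γ :=
  cs.filter (fun c => decide (∀ v ∈ nbr u, σ v ≠ some c))

def sc {γ : Type} [DecidableEq γ] (nbr : Int → List Int) (cs : List γ) :
    List Int → (Int → Option γ) → Int
  | [], _ => 1
  | u :: rest, σ =>
    ((scAllowed nbr cs σ u).map
      (fun c => sc nbr cs rest (fun v => if v = u then some c else σ v))).sum

-- sum over a filtered list as a sum of ites
theorem sum_filter_ite {γ : Type} (p : γ → Bool) (f : γ → Int) (l : List γ) :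
    ((l.filter p).map f).sum = (l.map (fun c => if p c then f c else 0)).sum := by
  induction l with
  | nil => rfl
  | cons a l ih =>
    by_cases h : p a <;> simp [List.filter_cons, h, ih]

theorem sum_comm_list {γ δ : Type} (A : List γ) (B : List δ) (h : γ → δ → Int) :
    (A.map (fun c => (B.map (h c)).sum)).sum = (B.map (fun d => (A.map (fun c => h c d)).sum)).sum := by
  induction A with
  | nil => simp
  | cons a A ih => simp [ih, ← List.sum_map_add]

theorem sc_congr_nbr {γ : Type} [DecidableEq γ] (nbr nbr' : Int → List Int) (cs : List γ)
    (vs : List Int) (σ : Int → Option γ) (h : ∀ u ∈ vs, nbr u = nbr' u) :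
    sc nbr cs vs σ = sc nbr' cs vs σ := by
  induction vs generalizing σ with
  | nil => rfl
  | cons u rest ih =>
    have hu : nbr u = nbr' u := h u (by simp)
    simp only [sc, scAllowed, hu]
    congr 1
    exact List.map_congr_left (fun c _ => ih _ (fun w hw => h w (by simp [hw])))

theorem sc_irrel {γ : Type} [DecidableEq γ] (nbr : Int → List Int) (cs : List γ)
    (vs : List Int) (σ σ' : Int → Option γ)
    (h : ∀ u ∈ vs, ∀ v ∈ nbr u, σ v = σ' v) :
    sc nbr cs vs σ = sc nbr cs vs σ' := by
  induction vs generalizing σ σ' with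
  | nil => rfl
  | cons u rest ih =>
    simp only [sc]
    have hall : scAllowed nbr cs σ u = scAllowed nbr cs σ' u := by
      unfold scAllowed
      apply List.filter_congr
      intro c _
      simp only [decide_eq_decide]
      constructor <;> intro hc v hv
      · rw [← h u (by simp) v hv]; exact hc v hv
      · rw [h u (by simp) v hv]; exact hc v hv
    rw [hall]
    congr 1
    apply List.map_congr_left
    intro c _
    apply ih
    intro w hw v hv
    by_cases hv' : v = u <;> simp [hv', h w (by simp [hw]) v hv]

theorem sc_split {γ : Type} [DecidableEq γ] (nbr : Int → List Int) (cs : List γ)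
    (vs1 vs2 : List Int) (σ : Int → Option γ)
    (hcross : ∀ u ∈ vs2, ∀ v ∈ nbr u, v ∉ vs1) :
    sc nbr cs (vs1 ++ vs2) σ = sc nbr cs vs1 σ * sc nbr cs vs2 σ := by
  induction vs1 generalizing σ with
  | nil => simp [sc]
  | cons a vs1 ih =>
    simp only [List.cons_append, sc]
    rw [← List.sum_map_mul_right]
    congr 1
    apply List.map_congr_left
    intro c _
    rw [ih _ (fun u hu v hv hm => hcross u hu v hv (by simp [hm]))]
    congr 1
    apply sc_irrel
    intro u hu v hv
    have : v ≠ a := fun h => hcross u hu v hv (by simp [h])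
    simp [this]

theorem sc_swap {γ : Type} [DecidableEq γ] (nbr : Int → List Int) (cs : List γ)
    (hsym : ∀ v w, w ∈ nbr v ↔ v ∈ nbr w)
    (a b : Int) (l : List Int) (σ : Int → Option γ)
    (hab : a ≠ b) (ha : σ a = none) (hb : σ b = none) :
    sc nbr cs (a :: b :: l) σ = sc nbr cs (b :: a :: l) σ := by
  have key : ∀ (x y : Int), x ≠ y → σ x = none → σ y = none →
      sc nbr cs (x :: y :: l) σ =
      ((scAllowed nbr cs σ x).map (fun c =>
        ((scAllowed nbr cs σ y).map (fun d =>
          if x ∈ nbr y ∧ c = d then 0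
          else sc nbr cs l (fun v => if v = y then some d else if v = x then some c else σ v))).sum)).sum := by
    intro x y hxy hx hy
    simp only [sc]
    congr 1
    apply List.map_congr_left
    intro c hc
    have hfe : scAllowed nbr cs (fun v => if v = x then some c else σ v) y
        = (scAllowed nbr cs σ y).filter (fun d => decide (¬ (x ∈ nbr y ∧ c = d))) := by
      unfold scAllowed
      rw [List.filter_filter]
      apply List.filter_congr
      intro d _
      simp only [← Bool.decide_and, decide_eq_decide]
      constructor
      · intro h
        refine ⟨fun hmemcd => ?_, fun v hv => ?_⟩
        · obtain ⟨hmem, hcd⟩ := hmemcd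
          have := h x hmem
          simp [hcd] at this
        · by_cases hvx : v = x
          · subst hvx; simp [hx]
          · have := h v hv; simpa [hvx] using this
      · rintro ⟨h1, h2⟩ v hv
        by_cases hvx : v = x
        · subst hvx; simp only [if_pos rfl]
          intro hcd
          exact h1 ⟨hv, by injection hcd⟩
        · simpa [hvx] using h2 v hv
    rw [hfe, sum_filter_ite]
    apply congrArg
    apply List.map_congr_left
    intro d _
    by_cases hco : x ∈ nbr y ∧ c = d
    · simp [hco]
    · simp only [hco, if_false, decide_not]
      rw [if_pos (by simpa using hco)]
  rw [key a b hab ha hb, key b a (Ne.symm hab) hb ha]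
  rw [sum_comm_list]
  apply congrArg
  apply List.map_congr_left
  intro d _
  apply congrArg
  apply List.map_congr_left
  intro c _
  have hadj : (a ∈ nbr b) ↔ (b ∈ nbr a) := hsym b a
  by_cases hco : a ∈ nbr b ∧ c = d
  · rw [if_pos hco, if_pos ⟨hadj.mp hco.1, hco.2.symm⟩]
  · rw [if_neg hco, if_neg (by rw [hadj] at hco; tauto)]
    apply congrArg
    funext v
    by_cases h1 : v = a <;> by_cases h2 : v = b <;> simp_all

theorem sc_perm {γ : Type} [DecidableEq γ] (nbr : Int → List Int) (cs : List γ)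
    (hsym : ∀ v w, w ∈ nbr v ↔ v ∈ nbr w) :
    ∀ {vs vs' : List Int}, vs.Perm vs' → ∀ σ : Int → Option γ,
      vs.Nodup → (∀ u ∈ vs, σ u = none) → sc nbr cs vs σ = sc nbr cs vs' σ := by
  intro vs vs' hp
  induction hp with
  | nil => intro _ _ _; rfl
  | cons x p ih =>
    intro σ hnd hnone
    simp only [sc]
    congr 1
    apply List.map_congr_left
    intro c _
    apply ih
    · exact (List.nodup_cons.mp hnd).2
    · intro u hu
      have hux : u ≠ x := fun h => (List.nodup_cons.mp hnd).1 (h ▸ hu)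
      simp [hux, hnone u (by simp [hu])]
  | swap x y l =>
    intro σ hnd hnone
    exact sc_swap nbr cs hsym y x l σ
      (by simp at hnd; tauto)
      (hnone y (by simp)) (hnone x (by simp))
  | trans p1 p2 ih1 ih2 =>
    intro σ hnd hnone
    rw [ih1 σ hnd hnone]
    exact ih2 σ (p1.nodup_iff.mp hnd) (fun u hu => hnone u (p1.mem_iff.mpr hu))

theorem sc_map {γ δ : Type} [DecidableEq γ] [DecidableEq δ] (nbr : Int → List Int)
    (cs : List γ) (g : γ → δ) (hg : Function.Injective g) :
    ∀ (vs : List Int) (σ : Int → Option γ),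
      sc nbr (cs.map g) vs (fun v => (σ v).map g) = sc nbr cs vs σ := by
  intro vs
  induction vs with
  | nil => intro σ; rfl
  | cons u rest ih =>
    intro σ
    simp only [sc]
    have hall : scAllowed nbr (cs.map g) (fun v => (σ v).map g) u = (scAllowed nbr cs σ u).map g := by
      unfold scAllowed
      rw [List.filter_map]
      congr 1
      apply List.filter_congr
      intro c _
      simp only [Function.comp_apply, decide_eq_decide]
      constructor <;> intro h v hv
      · intro hc
        exact h v hv (by simp [hc])
      · intro hc
        apply h v hv
        cases hσ : σ v with
        | none => simp [hσ] at hc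
        | some x =>
          simp [hσ] at hc ⊢
          exact hg hc
    rw [hall, List.map_map]
    apply congrArg
    apply List.map_congr_left
    intro c _
    have : (fun v => if v = u then some (g c) else (σ v).map g)
         = (fun v => ((if v = u then some c else σ v) : Option γ).map g) := by
      funext v; by_cases hv : v = u <;> simp [hv]
    simpa [this] using ih (fun v => if v = u then some c else σ v)


def edgeStepA (d : PySem.Dict Int (List Int)) (ab : Int × Int) : PySem.Dict Int (List Int) :=
  let d := d.insert ab.1 (d.getD ab.1 [] ++ [ab.2])
  d.insert ab.2 (d.getD ab.2 [] ++ [ab.1])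

def edgeStepB (L : List (List Int)) (ab : Int × Int) : List (List Int) :=
  let L := L.set ab.1.toNat ((L.getD ab.1.toNat []) ++ [ab.2])
  L.set ab.2.toNat ((L.getD ab.2.toNat []) ++ [ab.1])

theorem getD_edgeStepA (d : PySem.Dict Int (List Int)) (x y v : Int) :
    (edgeStepA d (x, y)).getD v [] =
      (d.getD v [] ++ (if v = x then [y] else [])) ++ (if v = y then [x] else []) := by
  unfold edgeStepA
  simp only [PySem.Dict.getD_insert]
  by_cases h1 : v = x <;> by_cases h2 : v = y <;> simp_all

theorem listGetD_set (a : List (List Int)) (i j : Nat) (v : List Int) (hi : i < a.length) :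
    (a.set i v).getD j [] = if j = i then v else a.getD j [] := by
  simp only [List.getD, List.getElem?_set]
  by_cases h : j = i <;> simp [h, hi, Ne.symm]

theorem getD_edgeStepB (a : List (List Int)) (x y v : Int)
    (hx : 0 ≤ x ∧ x.toNat < a.length) (hy : 0 ≤ y ∧ y.toNat < a.length)
    (hv : 0 ≤ v) :
    (edgeStepB a (x, y)).getD v.toNat [] =
      (a.getD v.toNat [] ++ (if v = x then [y] else [])) ++ (if v = y then [x] else []) := by
  unfold edgeStepB
  have hvx : v.toNat = x.toNat ↔ v = x := by omega
  have hvy : v.toNat = y.toNat ↔ v = y := by omega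
  have hyx : y.toNat = x.toNat ↔ y = x := by omega
  rw [listGetD_set _ _ _ _ (by simpa using hy.2)]
  by_cases h2 : v = y
  · rw [if_pos (by omega), if_pos h2, listGetD_set _ _ _ _ hx.2]
    by_cases h1 : v = x
    · rw [if_pos (by omega), if_pos h1, h1]
    · rw [if_neg (by omega), if_neg h1, h2]; simp
  · rw [if_neg (by omega), if_neg h2, listGetD_set _ _ _ _ hx.2]
    by_cases h1 : v = x
    · rw [if_pos (by omega), if_pos h1, h1]; simp
    · rw [if_neg (by omega), if_neg h1]; simp

def NbInv (N : Int) (d : PySem.Dict Int (List Int)) (a : List (List Int)) : Prop :=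
  a.length = N.toNat ∧
  (∀ v : Int, 0 ≤ v → v < N → d.getD v [] = a.getD v.toNat []) ∧
  (∀ v : Int, ¬(0 ≤ v ∧ v < N) → d.getD v [] = []) ∧
  (∀ v w : Int, w ∈ d.getD v [] ↔ v ∈ d.getD w []) ∧
  (∀ v w : Int, w ∈ d.getD v [] → (0 ≤ w ∧ w < N ∧ 0 ≤ v ∧ v < N))

theorem nbInv_step (N : Int) (d : PySem.Dict Int (List Int)) (a : List (List Int))
    (x y : Int) (hx : 0 ≤ x ∧ x < N) (hy : 0 ≤ y ∧ y < N)
    (h : NbInv N d a) : NbInv N (edgeStepA d (x, y)) (edgeStepB a (x, y)) := by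
  obtain ⟨hlen, hagree, hout, hsym, hrange⟩ := h
  have hxl : 0 ≤ x ∧ x.toNat < a.length := ⟨hx.1, by omega⟩
  have hyl : 0 ≤ y ∧ y.toNat < a.length := ⟨hy.1, by omega⟩
  have hlen' : (edgeStepB a (x, y)).length = a.length := by
    unfold edgeStepB; simp
  refine ⟨by omega, ?_, ?_, ?_, ?_⟩
  · intro v hv1 hv2
    rw [getD_edgeStepA, getD_edgeStepB a x y v hxl hyl hv1, hagree v hv1 hv2]
  · intro v hv
    rw [getD_edgeStepA, hout v hv]
    have h1 : ¬ v = x := fun h => hv (h ▸ hx)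
    have h2 : ¬ v = y := fun h => hv (h ▸ hy)
    simp [h1, h2]
  · have main : ∀ v w : Int,
        (w ∈ (d.getD v [] ++ (if v = x then [y] else [])) ++ (if v = y then [x] else [])) →
        (v ∈ (d.getD w [] ++ (if w = x then [y] else [])) ++ (if w = y then [x] else [])) := by
      intro v w hm
      simp only [List.mem_append] at hm ⊢
      rcases hm with (hm | hm) | hm
      · exact Or.inl (Or.inl ((hsym v w).mp hm))
      · by_cases hvx : v = x
        · rw [if_pos hvx] at hm
          have hw : w = y := by simpa using hm
          right; rw [if_pos hw, hvx]; simp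
        · rw [if_neg hvx] at hm; cases hm
      · by_cases hvy : v = y
        · rw [if_pos hvy] at hm
          have hw : w = x := by simpa using hm
          left; right; rw [if_pos hw, hvy]; simp
        · rw [if_neg hvy] at hm; cases hm
    intro v w
    rw [getD_edgeStepA, getD_edgeStepA]
    exact ⟨main v w, main w v⟩
  · intro v w hm
    rw [getD_edgeStepA] at hm
    simp only [List.mem_append] at hm
    rcases hm with (hm | hm) | hm
    · have := hrange v w hm; omega
    · by_cases hvx : v = x
      · rw [if_pos hvx] at hm
        have hw : w = y := by simpa using hm
        omega
      · rw [if_neg hvx] at hm; cases hm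
    · by_cases hvy : v = y
      · rw [if_pos hvy] at hm
        have hw : w = x := by simpa using hm
        omega
      · rw [if_neg hvy] at hm; cases hm

theorem nbInv_foldl (N : Int) :
    ∀ (es : List (Int × Int)) (d : PySem.Dict Int (List Int)) (a : List (List Int)),
      (∀ p ∈ es, 0 ≤ p.1 ∧ p.1 < N ∧ 0 ≤ p.2 ∧ p.2 < N) →
      NbInv N d a →
      NbInv N (es.foldl edgeStepA d) (es.foldl edgeStepB a) := by
  intro es
  induction es with
  | nil => intro d a _ h; exact h
  | cons p es ih =>
    intro d a hpre h
    have hp := hpre p (by simp)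
    exact ih _ _ (fun q hq => hpre q (by simp [hq]))
      (nbInv_step N d a p.1 p.2 ⟨hp.1, hp.2.1⟩ ⟨hp.2.2.1, hp.2.2.2⟩ h)

theorem getD_foldl_insert_nil :
    ∀ (l : List Int) (d : PySem.Dict Int (List Int)),
      (∀ v, d.getD v [] = []) →
      ∀ v, (l.foldl (fun d i => d.insert i ([] : List Int)) d).getD v [] = [] := by
  intro l
  induction l with
  | nil => intro d h v; exact h v
  | cons x l ih =>
    intro d h v
    refine ih _ (fun w => ?_) v
    rw [PySem.Dict.getD_insert]
    split <;> simp [h]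

theorem getD_map_const_nil :
    ∀ (l : List Int) (j : Nat), (l.map (fun _ => ([] : List Int))).getD j [] = [] := by
  intro l
  induction l with
  | nil => intro j; rfl
  | cons x l ih =>
    intro j
    cases j with
    | zero => rfl
    | succ j => simpa using ih j

theorem nbInv_build (N : Int) (edges : List (Int × Int))
    (hpre : ∀ p ∈ edges, 0 ≤ p.1 ∧ p.1 < N ∧ 0 ≤ p.2 ∧ p.2 < N) :
    NbInv N (buildNbA N edges) (buildAdjB N edges) := by
  have h1 : buildNbA N edges = edges.foldl edgeStepA
      ((PySem.List.pyRange 0 N 1).foldl (fun d i => d.insert i []) PySem.Dict.empty) := rfl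
  have h2 : buildAdjB N edges = edges.foldl edgeStepB
      ((PySem.List.pyRange 0 N 1).map (fun _ => ([] : List Int))) := rfl
  rw [h1, h2]
  apply nbInv_foldl N edges _ _ hpre
  have hd0 : ∀ v, ((PySem.List.pyRange 0 N 1).foldl
      (fun d i => d.insert i ([] : List Int)) PySem.Dict.empty).getD v [] = [] :=
    getD_foldl_insert_nil _ _ (fun v => by simp [pysem])
  refine ⟨?_, ?_, ?_, ?_, ?_⟩
  · simp [PySem.List.length_pyRange_one]
  · intro v _ _; rw [hd0 v, getD_map_const_nil]
  · intro v _; exact hd0 v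
  · intro v w; rw [hd0 v, hd0 w]; simp
  · intro v w hm; rw [hd0 v] at hm; cases hm



-- the set `valid` A builds for vertex u: members and Nodup
theorem validFold_spec (col : PySem.Dict Int Char) (l : List Int) :
    ∀ s : PySem.Set Char, s.Nodup →
      (l.foldl (fun s v =>
        match col.get? v with
        | some cv => if s.contains cv then PySem.Set.discard s cv else s
        | none => s) s).Nodup ∧
      ∀ c, c ∈ (l.foldl (fun s v =>
        match col.get? v with
        | some cv => if s.contains cv then PySem.Set.discard s cv else s
        | none => s) s) ↔ (c ∈ s ∧ ∀ v ∈ l, col.get? v ≠ some c) := by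
  induction l with
  | nil => intro s hs; exact ⟨hs, by simp⟩
  | cons v l ih =>
    intro s hs
    simp only [List.foldl_cons]
    have hstep : ∀ c, (c ∈ (match col.get? v with
        | some cv => if s.contains cv then PySem.Set.discard s cv else s
        | none => s) ↔ (c ∈ s ∧ col.get? v ≠ some c)) := by
      intro c
      cases hv : col.get? v with
      | none => simp
      | some cv =>
        simp only []
        by_cases hc : s.contains cv
        · rw [if_pos hc, PySem.Set.mem_discard]
          constructor
          · rintro ⟨h1, h2⟩; exact ⟨h1, by simp [Ne.symm h2]⟩
          · rintro ⟨h1, h2⟩; exact ⟨h1, fun he => h2 (by rw [he])⟩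
        · rw [if_neg hc]
          have hcv : cv ∉ s := fun hm => hc (List.elem_eq_true_of_mem hm)
          constructor
          · intro h1
            refine ⟨h1, fun he => hcv ?_⟩
            have : cv = c := by injection he
            rwa [this]
          · exact fun h => h.1
    have hnd : (match col.get? v with
        | some cv => if s.contains cv then PySem.Set.discard s cv else s
        | none => s).Nodup := by
      cases col.get? v with
      | none => exact hs
      | some cv =>
        simp only []
        split
        · exact PySem.Set.nodup_discard _ _ hs
        · exact hs
    obtain ⟨ih1, ih2⟩ := ih _ hnd
    refine ⟨ih1, fun c => ?_⟩
    rw [ih2 c, hstep c]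
    constructor
    · rintro ⟨⟨h1, h2⟩, h3⟩
      refine ⟨h1, fun w hw => ?_⟩
      rcases List.mem_cons.mp hw with hw' | hw'
      · subst hw'; exact h2
      · exact h3 w hw'
    · rintro ⟨h1, h2⟩
      exact ⟨⟨h1, h2 v (by simp)⟩, fun w hw => h2 w (by simp [hw])⟩


theorem numWaysA_eq_sc (nb : PySem.Dict Int (List Int)) (t : List Int) :
    ∀ (fuel i : Nat) (col : PySem.Dict Int Char), i < t.length → t.length ≤ i + fuel →
      numWaysA nb t fuel i col =
        sc (fun v => nb.getD v []) ("RGB".toList) (t.drop i) (fun v => col.get? v) := by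
  intro fuel
  induction fuel with
  | zero => intro i col h1 h2; omega
  | succ fuel ih =>
    intro i col h1 h2
    have hdrop : t.drop i = t[i] :: t.drop (i + 1) := List.drop_eq_getElem_cons h1
    have hu : t.getD i 0 = t[i] := List.getD_eq_getElem t 0 h1
    obtain ⟨hvnd, hvmem⟩ := validFold_spec col (nb.getD (t.getD i 0) [])
      (PySem.Set.ofList ("RGB".toList)) (PySem.Set.nodup_ofList _)
    have hperm : (((nb.getD (t.getD i 0) []).foldl (fun s v =>
        match col.get? v with
        | some cv => if s.contains cv then PySem.Set.discard s cv else s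
        | none => s) (PySem.Set.ofList ("RGB".toList)))).Perm
        (scAllowed (fun v => nb.getD v []) ("RGB".toList) (fun v => col.get? v) t[i]) := by
      refine (List.perm_ext_iff_of_nodup hvnd (List.Nodup.filter _ (by decide))).mpr ?_
      intro c
      rw [hvmem c, List.mem_filter]
      simp only [PySem.Set.mem_ofList, decide_eq_true_eq, hu]
    simp only [numWaysA]
    by_cases hlast : t.length ≤ i + 1
    · rw [if_pos hlast]
      have hdrop1 : t.drop (i + 1) = [] := List.drop_eq_nil_of_le hlast
      rw [hdrop, hdrop1]
      simp only [sc]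
      rw [← (hperm.map (fun _ => (1 : Int))).sum_eq, PySem.List.sum_map_const_int]
      simp [PySem.Set.len]
    · rw [if_neg hlast]
      rw [PySem.List.foldl_add _ (fun c => numWaysA nb t fuel (i+1) (col.insert (t.getD i 0) c)) 0]
      rw [hdrop]
      simp only [sc]
      rw [← (hperm.map _).sum_eq]
      rw [zero_add]
      apply congrArg
      apply List.map_congr_left
      intro c _
      rw [ih (i+1) (col.insert (t.getD i 0) c) (by omega) (by omega)]
      apply congrArg
      funext v
      rw [PySem.Dict.get?_insert]
      rw [hu]


theorem nodup_range_length (N : Int) (l : List Int) (hnd : l.Nodup)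
    (hr : ∀ x ∈ l, 0 ≤ x ∧ x < N) : l.length ≤ N.toNat := by
  have hsub : l ⊆ PySem.List.pyRange 0 N 1 := by
    intro x hx
    rw [PySem.List.mem_pyRange_one]
    exact ⟨(hr x hx).1, (hr x hx).2⟩
  have := List.Subperm.length_le (List.subperm_of_subset hnd hsub)
  rwa [PySem.List.length_pyRange_one, show N - 0 = N by ring] at this

theorem traverseA_spec (nb : PySem.Dict Int (List Int)) (N : Int)
    (hrange : ∀ v w : Int, w ∈ nb.getD v [] → 0 ≤ w ∧ w < N ∧ 0 ≤ v ∧ v < N)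
    (hsym : ∀ v w : Int, w ∈ nb.getD v [] ↔ v ∈ nb.getD w []) :
    ∀ (fuel : Nat) (u : Int) (vis : List Int),
      vis.Nodup → u ∉ vis → (∀ x ∈ vis, 0 ≤ x ∧ x < N) → (0 ≤ u ∧ u < N) →
      N.toNat < fuel + vis.length →
      ∃ tail, traverseA nb fuel u vis = vis ++ u :: tail ∧
        (vis ++ u :: tail).Nodup ∧
        (∀ x ∈ u :: tail, 0 ≤ x ∧ x < N) ∧
        (∀ w ∈ u :: tail, ∀ v ∈ nb.getD w [], v ∈ vis ++ u :: tail) ∧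
        (∀ V : List Int, (∀ x ∈ V, ∀ y ∈ nb.getD x [], y ∈ V) →
          u ∉ V → (∀ x ∈ vis, x ∉ V) → ∀ w ∈ u :: tail, w ∉ V) := by
  intro fuel
  induction fuel with
  | zero =>
    intro u vis hnd hu hvr _ hfuel
    exfalso
    have := nodup_range_length N vis hnd hvr
    omega
  | succ fuel ihf =>
    intro u vis hnd hu hvr hur hfuel
    -- the per-accumulator invariant of the inner for-loop
    let P : List Int → Prop := fun acc => ∃ tl, acc = vis ++ u :: tl ∧ acc.Nodup ∧
        (∀ x ∈ u :: tl, 0 ≤ x ∧ x < N) ∧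
        (∀ w ∈ tl, ∀ v ∈ nb.getD w [], v ∈ acc) ∧
        (∀ V : List Int, (∀ x ∈ V, ∀ y ∈ nb.getD x [], y ∈ V) →
          u ∉ V → (∀ x ∈ vis, x ∉ V) → ∀ w ∈ u :: tl, w ∉ V)
    have fold_spec : ∀ (l : List Int) (acc : List Int),
        (∀ v ∈ l, v ∈ nb.getD u []) → P acc →
        P (l.foldl (fun vis v => if vis.contains v then vis else traverseA nb fuel v vis) acc) ∧
        (∀ x ∈ acc, x ∈ (l.foldl (fun vis v => if vis.contains v then vis else traverseA nb fuel v vis) acc)) ∧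
        (∀ v ∈ l, v ∈ (l.foldl (fun vis v => if vis.contains v then vis else traverseA nb fuel v vis) acc)) := by
      intro l
      induction l with
      | nil => intro acc _ hP; exact ⟨hP, fun x hx => hx, by simp⟩
      | cons v l ihl =>
        intro acc hl hP
        simp only [List.foldl_cons]
        by_cases hc : acc.contains v
        · rw [if_pos hc]
          obtain ⟨hP', hmono, hall⟩ := ihl acc (fun w hw => hl w (by simp [hw])) hP
          refine ⟨hP', hmono, fun w hw => ?_⟩
          rcases List.mem_cons.mp hw with hw' | hw'
          · subst hw'; exact hmono _ (List.mem_of_elem_eq_true hc)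
          · exact hall w hw'
        · rw [if_neg hc]
          obtain ⟨tl, hacc, haccnd, haccr, hacccl, haccV⟩ := hP
          have hvm : v ∈ nb.getD u [] := hl v (by simp)
          have hvr' : 0 ≤ v ∧ v < N := ⟨(hrange u v hvm).1, (hrange u v hvm).2.1⟩
          have hvnacc : v ∉ acc := fun hm => hc (List.elem_eq_true_of_mem hm)
          have haccr' : ∀ x ∈ acc, 0 ≤ x ∧ x < N := by
            intro x hx
            rw [hacc] at hx
            rcases List.mem_append.mp hx with hx' | hx'
            · exact hvr x hx'
            · exact haccr x hx'
          have hfuel' : N.toNat < fuel + acc.length := by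
            rw [hacc]
            simp only [List.length_append, List.length_cons]
            omega
          obtain ⟨tail', heq', hnd', hr', hcl', hV'⟩ :=
            ihf v acc haccnd hvnacc haccr' hvr' hfuel'
          have hPnew : P (traverseA nb fuel v acc) := by
            refine ⟨tl ++ v :: tail', ?_, ?_, ?_, ?_, ?_⟩
            · rw [heq', hacc]; simp
            · rw [heq']; exact hnd'
            · intro x hx
              rcases List.mem_cons.mp hx with hx' | hx'
              · exact haccr x (by simp [hx'])
              · rcases List.mem_append.mp hx' with hx'' | hx''
                · exact haccr x (by simp [hx''])
                · exact hr' x hx''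
            · intro w hw v' hv'
              rw [heq']
              rcases List.mem_append.mp hw with hw' | hw'
              · exact List.mem_append_left _ (hacccl w hw' v' hv')
              · exact hcl' w hw' v' hv'
            · intro V hVc hVu hVvis w hw
              have haccV' : ∀ x ∈ acc, x ∉ V := by
                intro x hx
                rw [hacc] at hx
                rcases List.mem_append.mp hx with hx' | hx'
                · exact hVvis x hx'
                · exact haccV V hVc hVu hVvis x hx'
              have hvnV : v ∉ V := by
                intro hvV
                exact haccV V hVc hVu hVvis u (by simp) (hVc v hvV u ((hsym u v).mp hvm))
              rcases List.mem_cons.mp hw with hw' | hw'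
              · exact hw' ▸ haccV V hVc hVu hVvis u (by simp)
              · rcases List.mem_append.mp hw' with hw'' | hw''
                · exact haccV V hVc hVu hVvis w (by simp [hw''])
                · exact hV' V hVc hvnV haccV' w hw''
          obtain ⟨hP'', hmono, hall⟩ := ihl _ (fun w hw => hl w (by simp [hw])) hPnew
          refine ⟨hP'', fun x hx => hmono x (by rw [heq']; simp [hx]), fun w hw => ?_⟩
          rcases List.mem_cons.mp hw with hw' | hw'
          · subst hw'; exact hmono w (by rw [heq']; simp)
          · exact hall w hw'
    have hP0 : P (vis ++ [u]) := by
      refine ⟨[], rfl, ?_, ?_, by simp, ?_⟩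
      · simp [List.nodup_append, hnd]
        exact fun a ha hau => hu (hau ▸ ha)
      · intro x hx
        have : x = u := by simpa using hx
        exact this ▸ hur
      · intro V _ hVu _ w hw
        have : w = u := by simpa using hw
        exact this ▸ hVu
    obtain ⟨hPf, hmono, hnall⟩ := fold_spec (nb.getD u []) (vis ++ [u]) (fun v hv => hv) hP0
    obtain ⟨tl, heq, hndf, hrf, hclf, hVf⟩ := hPf
    refine ⟨tl, ?_, heq ▸ hndf, hrf, ?_, hVf⟩
    · simpa only [traverseA] using heq
    · intro w hw v hv
      rcases List.mem_cons.mp hw with hw' | hw'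
      · exact heq ▸ hnall v (hw' ▸ hv)
      · exact heq ▸ hclf w hw' v hv


theorem loopA (nb : PySem.Dict Int (List Int)) (N : Int)
    (hrange : ∀ v w : Int, w ∈ nb.getD v [] → 0 ≤ w ∧ w < N ∧ 0 ≤ v ∧ v < N)
    (hsym : ∀ v w : Int, w ∈ nb.getD v [] ↔ v ∈ nb.getD w []) :
    ∀ (ℓ : List Int) (S : PySem.Set Int) (r : Int) (L : List Int),
      (∀ x ∈ ℓ, 0 ≤ x ∧ x < N) →
      L.Nodup → (∀ x ∈ L, 0 ≤ x ∧ x < N) →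
      (∀ w ∈ L, ∀ v ∈ nb.getD w [], v ∈ L) →
      (∀ x : Int, x ∈ S ↔ x ∈ L) →
      r = sc (fun v => nb.getD v []) ("RGB".toList) L (fun _ => none) →
      ∃ L', (ℓ.foldl (fun (st : PySem.Set Int × Int) u =>
          if PySem.Set.contains st.1 u then st
          else
            let t := traverseA nb (N.toNat + 1) u []
            let r := st.2 * numWaysA nb t t.length 0 PySem.Dict.empty
            (t.foldl (fun s v => PySem.Set.add s v) st.1, r)) (S, r)).2 =
          sc (fun v => nb.getD v []) ("RGB".toList) L' (fun _ => none) ∧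
        L'.Nodup ∧ (∀ x ∈ L', 0 ≤ x ∧ x < N) ∧
        (∀ w ∈ L', ∀ v ∈ nb.getD w [], v ∈ L') ∧
        (∀ x ∈ ℓ, x ∈ L') ∧ (∀ x ∈ L, x ∈ L') := by
  intro ℓ
  induction ℓ with
  | nil =>
    intro S r L _ h1 h2 h3 _ h5
    exact ⟨L, h5 ▸ rfl, h1, h2, h3, by simp, fun x hx => hx⟩
  | cons u ℓ ihl =>
    intro S r L hlr hnd hLr hLcl hSL hr
    simp only [List.foldl_cons]
    by_cases hc : PySem.Set.contains S u
    · rw [if_pos hc]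
      obtain ⟨L', h1, h2, h3, h4, h5, h6⟩ :=
        ihl S r L (fun x hx => hlr x (by simp [hx])) hnd hLr hLcl hSL hr
      refine ⟨L', h1, h2, h3, h4, fun x hx => ?_, h6⟩
      rcases List.mem_cons.mp hx with hx' | hx'
      · subst hx'
        exact h6 x ((hSL x).mp (List.mem_of_elem_eq_true hc))
      · exact h5 x hx'
    · rw [if_neg hc]
      have hu : u ∉ L := fun hm => hc (List.elem_eq_true_of_mem ((hSL u).mpr hm))
      have hur : 0 ≤ u ∧ u < N := hlr u (by simp)
      obtain ⟨tail, heq, hndt, hrt, hclt, hVt⟩ :=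
        traverseA_spec nb N hrange hsym (N.toNat + 1) u [] (by simp) (by simp) (by simp) hur (by simp)
      simp only [List.nil_append] at heq hndt hclt hVt
      have hdisj : ∀ w ∈ u :: tail, w ∉ L := hVt L hLcl hu (by simp)
      have hL'nd : (L ++ u :: tail).Nodup := by
        rw [List.nodup_append]
        refine ⟨hnd, hndt, ?_⟩
        intro a ha b hb hab
        exact hdisj b hb (hab ▸ ha)
      have hcount : numWaysA nb (traverseA nb (N.toNat + 1) u [])
          (traverseA nb (N.toNat + 1) u []).length 0 PySem.Dict.empty =
          sc (fun v => nb.getD v []) ("RGB".toList) (u :: tail) (fun _ => none) := by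
        rw [heq]
        rw [numWaysA_eq_sc nb (u :: tail) (u :: tail).length 0 PySem.Dict.empty (by simp) (by omega)]
        simp [pysem]
      have hsplit : sc (fun v => nb.getD v []) ("RGB".toList) (L ++ u :: tail) (fun _ => none) =
          sc (fun v => nb.getD v []) ("RGB".toList) L (fun _ => none) *
          sc (fun v => nb.getD v []) ("RGB".toList) (u :: tail) (fun _ => none) := by
        apply sc_split
        intro w hw v hv hvL
        exact hdisj v (hclt w hw v hv) hvL
      obtain ⟨L', h1, h2, h3, h4, h5, h6⟩ := ihl
        ((traverseA nb (N.toNat + 1) u []).foldl (fun s v => PySem.Set.add s v) S)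
        (r * numWaysA nb (traverseA nb (N.toNat + 1) u [])
          (traverseA nb (N.toNat + 1) u []).length 0 PySem.Dict.empty)
        (L ++ u :: tail)
        (fun x hx => hlr x (by simp [hx])) hL'nd
        (fun x hx => (List.mem_append.mp hx).elim (hLr x) (hrt x))
        (fun w hw v hv => by
          rcases List.mem_append.mp hw with hw' | hw'
          · exact List.mem_append_left _ (hLcl w hw' v hv)
          · exact List.mem_append_right _ (hclt w hw' v hv))
        (fun x => by
          rw [PySem.Set.mem_foldl_add (f := fun v => v)]
          constructor
          · rintro (hx | ⟨b, hb, rfl⟩)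
            · exact List.mem_append_left _ ((hSL x).mp hx)
            · exact List.mem_append_right _ (heq ▸ hb)
          · intro hx
            rcases List.mem_append.mp hx with hx' | hx'
            · exact Or.inl ((hSL x).mpr hx')
            · exact Or.inr ⟨x, heq ▸ hx', rfl⟩)
        (by rw [hcount, hr, ← hsplit])
      refine ⟨L', h1, h2, h3, h4, fun x hx => ?_, fun x hx => h6 x (List.mem_append_left _ hx)⟩
      rcases List.mem_cons.mp hx with hx' | hx'
      · subst hx'; exact h6 x (List.mem_append_right _ (by simp))
      · exact h5 x hx'


theorem pyRange_nodup (N : Int) : (PySem.List.pyRange 0 N 1).Nodup := by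
  by_cases h : 0 ≤ N
  · obtain ⟨n, rfl⟩ := Int.eq_ofNat_of_zero_le h
    rw [PySem.List.pyRange_zero_natCast]
    exact (List.nodup_range).map (fun a b => by omega)
  · have hnil : PySem.List.pyRange 0 N 1 = [] := by
      rw [List.eq_nil_iff_forall_not_mem]
      intro x hx
      rw [PySem.List.mem_pyRange_one] at hx
      omega
    simp [hnil]

theorem ansA_eq (N M : Int) (edges : List (Int × Int))
    (hpre : ∀ p ∈ edges, 0 ≤ p.1 ∧ p.1 < N ∧ 0 ≤ p.2 ∧ p.2 < N) :
    ans_fast N M edges = sc (fun v => (buildNbA N edges).getD v [])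
      ("RGB".toList) (PySem.List.pyRange 0 N 1) (fun _ => none) := by
  obtain ⟨hlen, hagree, hout, hsym, hrange⟩ := nbInv_build N edges hpre
  have hrange' : ∀ v w : Int, w ∈ (buildNbA N edges).getD v [] →
      0 ≤ w ∧ w < N ∧ 0 ≤ v ∧ v < N := hrange
  obtain ⟨L', h1, h2, h3, _, h5, _⟩ := loopA (buildNbA N edges) N hrange' hsym
    (PySem.List.pyRange 0 N 1) PySem.Set.empty 1 []
    (fun x hx => by rw [PySem.List.mem_pyRange_one] at hx; omega)
    (by simp) (by simp) (by simp) (fun x => by constructor <;> intro h <;> cases h) rfl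
  have hgoal : ans_fast N M edges = sc (fun v => (buildNbA N edges).getD v [])
      ("RGB".toList) L' (fun _ => none) := h1
  rw [hgoal]
  refine sc_perm _ _ hsym ?_ _ h2 (fun _ _ => rfl)
  rw [List.perm_ext_iff_of_nodup h2 (pyRange_nodup N)]
  intro x
  rw [PySem.List.mem_pyRange_one]
  constructor
  · intro hx; have := h3 x hx; omega
  · intro hx
    exact h5 x (by rw [PySem.List.mem_pyRange_one]; omega)


-- ===== B side =====

theorem intListGetD_set (a : List Int) (i j : Nat) (v d : Int) (hi : i < a.length) :
    (a.set i v).getD j d = if j = i then v else a.getD j d := by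
  simp only [List.getD, List.getElem?_set]
  by_cases h : j = i <;> simp [h, hi, Ne.symm]

theorem getD_append_left (l1 l2 : List Int) (j : Nat) (d : Int) (h : j < l1.length) :
    (l1 ++ l2).getD j d = l1.getD j d := by
  simp [List.getD, List.getElem?_append_left h]

theorem foldl_skip_add {γ : Type} (q : γ → Bool) (f : γ → Int) :
    ∀ (l : List γ) (a : Int),
      l.foldl (fun a c => if q c then a else a + f c) a =
        a + ((l.filter (fun c => !q c)).map f).sum := by
  intro l
  induction l with
  | nil => intro a; simp
  | cons c l ih =>
    intro a
    by_cases hq : q c <;> simp [List.filter_cons, hq, ih, add_assoc]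

def sigmaArr (color : List Int) : Int → Option Int :=
  fun v => if color.getD v.toNat (-1) = -1 then none else some (color.getD v.toNat (-1))

theorem countB_eq_sc (adj : List (List Int)) (N : Int) (order : List Int)
    (hadjr : ∀ u v : Int, 0 ≤ u → u < N → v ∈ adj.getD u.toNat [] → 0 ≤ v ∧ v < N)
    (hor : ∀ x ∈ order, 0 ≤ x ∧ x < N) :
    ∀ (fuel i : Nat) (color : List Int),
      color.length = N.toNat →
      order.length ≤ i + fuel →
      countB adj order fuel i color =
        sc (fun v => adj.getD v.toNat []) ([0, 1, 2] : List Int) (order.drop i) (sigmaArr color) := by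
  intro fuel
  induction fuel with
  | zero =>
    intro i color _ h2
    rw [List.drop_eq_nil_of_le (by omega)]
    rfl
  | succ fuel ih =>
    intro i color hlen h2
    simp only [countB]
    by_cases hle : order.length ≤ i
    · rw [if_pos hle, List.drop_eq_nil_of_le hle]
      rfl
    · rw [if_neg hle]
      have hi : i < order.length := by omega
      have hdrop : order.drop i = order[i] :: order.drop (i + 1) := List.drop_eq_getElem_cons hi
      have hu : order.getD i 0 = order[i] := List.getD_eq_getElem order 0 hi
      have hum : order[i] ∈ order := List.getElem_mem hi
      have hur : 0 ≤ order[i] ∧ order[i] < N := hor _ hum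
      rw [foldl_skip_add]
      rw [hdrop]
      simp only [sc]
      rw [zero_add]
      have hfilter : (([0, 1, 2] : List Int).filter
          (fun c => !((adj.getD (order.getD i 0).toNat []).any (fun v => color.getD v.toNat 0 == c)))) =
          scAllowed (fun v => adj.getD v.toNat []) ([0, 1, 2] : List Int) (sigmaArr color) order[i] := by
        unfold scAllowed
        apply List.filter_congr
        intro c hc
        have hcv : c = 0 ∨ c = 1 ∨ c = 2 := by
          simp only [List.mem_cons, List.not_mem_nil, or_false] at hc
          tauto
        rw [hu, Bool.eq_iff_iff]
        simp only [Bool.not_eq_true', List.any_eq_false, beq_eq_false_iff_ne, ne_eq,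
          decide_eq_true_eq]
        constructor
        · intro hL v hv hC
          have hvr := hadjr order[i] v hur.1 hur.2 hv
          have hlt : v.toNat < color.length := by omega
          have h0 : color.getD v.toNat 0 = color[v.toNat] := List.getD_eq_getElem color 0 hlt
          have h1 : color.getD v.toNat (-1) = color[v.toNat] := List.getD_eq_getElem color (-1) hlt
          unfold sigmaArr at hC
          rw [h1] at hC
          by_cases hm1 : color[v.toNat] = -1
          · rw [if_pos hm1] at hC; cases hC
          · rw [if_neg hm1] at hC
            have hcc : color[v.toNat] = c := by injection hC
            have := hL v hv
            rw [h0, hcc] at this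
            simp at this
        · intro hR v hv
          have hvr := hadjr order[i] v hur.1 hur.2 hv
          have hlt : v.toNat < color.length := by omega
          have h0 : color.getD v.toNat 0 = color[v.toNat] := List.getD_eq_getElem color 0 hlt
          have h1 : color.getD v.toNat (-1) = color[v.toNat] := List.getD_eq_getElem color (-1) hlt
          have hRc := hR v hv
          unfold sigmaArr at hRc
          rw [h1] at hRc
          rw [h0]
          by_cases hm1 : color[v.toNat] = -1
          · rw [hm1]
            simp only [beq_iff_eq]
            omega
          · rw [if_neg hm1] at hRc
            intro hEq
            rw [beq_iff_eq] at hEq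
            exact hRc (by rw [hEq])
      rw [hfilter]
      apply congrArg
      apply List.map_congr_left
      intro c hc
      have hc012 : c = 0 ∨ c = 1 ∨ c = 2 := by
        have := List.mem_of_mem_filter hc
        simp only [List.mem_cons, List.not_mem_nil, or_false] at this
        tauto
      rw [hu]
      rw [ih (i + 1) (color.set order[i].toNat c) (by simpa using hlen) (by omega)]
      apply sc_irrel
      intro w hw v hv
      have hwm : w ∈ order := List.mem_of_mem_drop hw
      have hwr := hor w hwm
      have hvr := hadjr w v hwr.1 hwr.2 hv
      unfold sigmaArr
      rw [intListGetD_set color order[i].toNat v.toNat c (-1) (by omega)]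
      by_cases hvu : v = order[i]
      · have ht : v.toNat = order[i].toNat := by omega
        rw [if_pos ht, if_neg (by omega : ¬(c = -1)), if_pos hvu]
      · have ht : ¬ v.toNat = order[i].toNat := by omega
        rw [if_neg ht, if_neg hvu]



theorem boolListGetD_set (a : List Bool) (i j : Nat) (v : Bool) (d : Bool) (hi : i < a.length) :
    (a.set i v).getD j d = if j = i then v else a.getD j d := by
  simp only [List.getD, List.getElem?_set]
  by_cases h : j = i <;> simp [h, hi, Ne.symm]

theorem bfsB_spec (adj : List (List Int)) (N : Int)
    (hadjr : ∀ u v : Int, 0 ≤ u → u < N → v ∈ adj.getD u.toNat [] → 0 ≤ v ∧ v < N)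
    (hsymB : ∀ u v : Int, 0 ≤ u → u < N → 0 ≤ v → v < N →
      (v ∈ adj.getD u.toNat [] ↔ u ∈ adj.getD v.toNat []))
    (V : List Int)
    (hVcl : ∀ x ∈ V, ∀ y ∈ adj.getD x.toNat [], y ∈ V)
    (hVr : ∀ x ∈ V, 0 ≤ x ∧ x < N) :
    ∀ (fuel : Nat) (order : List Int) (head : Nat) (seen : List Bool),
      order.Nodup → (∀ x ∈ order, 0 ≤ x ∧ x < N) → (∀ x ∈ order, x ∉ V) →
      seen.length = N.toNat →
      (∀ x : Int, 0 ≤ x → x < N → (seen.getD x.toNat false = true ↔ (x ∈ order ∨ x ∈ V))) →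
      head ≤ order.length →
      (∀ j : Nat, j < head → ∀ v ∈ adj.getD (order.getD j 0).toNat [], v ∈ order) →
      N.toNat < fuel + head →
      ∃ tail2, (bfsB adj fuel order head seen).1 = order ++ tail2 ∧
        (order ++ tail2).Nodup ∧
        (∀ x ∈ order ++ tail2, 0 ≤ x ∧ x < N) ∧
        (∀ x ∈ order ++ tail2, x ∉ V) ∧
        (bfsB adj fuel order head seen).2.length = N.toNat ∧
        (∀ x : Int, 0 ≤ x → x < N →
          ((bfsB adj fuel order head seen).2.getD x.toNat false = true ↔ (x ∈ order ++ tail2 ∨ x ∈ V))) ∧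
        (∀ w ∈ order ++ tail2, ∀ v ∈ adj.getD w.toNat [], v ∈ order ++ tail2) := by
  intro fuel
  induction fuel with
  | zero =>
    intro order head seen hnd hor hoV hsl hsiff hhead _ hfuel
    exfalso
    have := nodup_range_length N order hnd hor
    omega
  | succ fuel ihf =>
    intro order head seen hnd hor hoV hsl hsiff hhead hproc hfuel
    simp only [bfsB]
    by_cases hle : order.length ≤ head
    · rw [if_pos hle]
      have hhead' : head = order.length := by omega
      refine ⟨[], by simp, by simpa using hnd, by simpa using hor, by simpa using hoV, hsl,
        by simpa using hsiff, ?_⟩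
      intro w hw v hv
      simp only [List.append_nil] at hw ⊢
      obtain ⟨j, hj, hje⟩ := List.getElem_of_mem hw
      have : order.getD j 0 = w := by rw [List.getD_eq_getElem order 0 hj, hje]
      exact hproc j (by omega) v (by rwa [this])
    · rw [if_neg hle]
      have hhl : head < order.length := by omega
      have hu : order.getD head 0 = order[head] := List.getD_eq_getElem order 0 hhl
      have hum : order[head] ∈ order := List.getElem_mem hhl
      have hur := hor _ hum
      -- the inner fold over the neighbours of u
      have fold_spec : ∀ (l : List Int) (st : List Int × List Bool),
          (∀ v ∈ l, v ∈ adj.getD (order.getD head 0).toNat []) →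
          (∃ t2, st.1 = order ++ t2) → st.1.Nodup → (∀ x ∈ st.1, 0 ≤ x ∧ x < N) →
          (∀ x ∈ st.1, x ∉ V) → st.2.length = N.toNat →
          (∀ x : Int, 0 ≤ x → x < N → (st.2.getD x.toNat false = true ↔ (x ∈ st.1 ∨ x ∈ V))) →
          (let st' := l.foldl (fun (os : List Int × List Bool) v =>
              if os.2.getD v.toNat false then os
              else (os.1 ++ [v], os.2.set v.toNat true)) st
           (∃ t2, st'.1 = order ++ t2) ∧ (∀ x ∈ st.1, x ∈ st'.1) ∧ st'.1.Nodup ∧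
           (∀ x ∈ st'.1, 0 ≤ x ∧ x < N) ∧ (∀ x ∈ st'.1, x ∉ V) ∧ st'.2.length = N.toNat ∧
           (∀ x : Int, 0 ≤ x → x < N → (st'.2.getD x.toNat false = true ↔ (x ∈ st'.1 ∨ x ∈ V))) ∧
           (∀ v ∈ l, v ∈ st'.1)) := by
        intro l
        induction l with
        | nil =>
          intro st _ h1 h2 h3 h4 h5 h6
          exact ⟨h1, fun x hx => hx, h2, h3, h4, h5, h6, by simp⟩
        | cons v l ihl =>
          intro st hl h1 h2 h3 h4 h5 h6
          simp only [List.foldl_cons]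
          have hvm : v ∈ adj.getD (order.getD head 0).toNat [] := hl v (by simp)
          have hvr : 0 ≤ v ∧ v < N := hadjr order[head] v hur.1 hur.2 (by rwa [hu] at hvm)
          by_cases hs : st.2.getD v.toNat false
          · rw [if_pos hs]
            obtain ⟨hh1, hmono, hh2, hh3, hh4, hh5, hh6, hall⟩ :=
              ihl st (fun w hw => hl w (by simp [hw])) h1 h2 h3 h4 h5 h6
            refine ⟨hh1, hmono, hh2, hh3, hh4, hh5, hh6, fun w hw => ?_⟩
            rcases List.mem_cons.mp hw with hw' | hw'
            · subst hw'
              have hvin : w ∈ st.1 ∨ w ∈ V := (h6 w hvr.1 hvr.2).mp hs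
              rcases hvin with hvin | hvin
              · exact hmono w hvin
              · exfalso
                have : order[head] ∈ V := hVcl w hvin order[head]
                  ((hsymB order[head] w hur.1 hur.2 hvr.1 hvr.2).mp (by rwa [hu] at hvm))
                obtain ⟨t2, ht2⟩ := h1
                exact h4 order[head] (ht2 ▸ List.mem_append_left _ hum) this
            · exact hall w hw'
          · rw [if_neg hs]
            have hvnew : v ∉ st.1 ∧ v ∉ V := by
              have := h6 v hvr.1 hvr.2
              constructor
              · intro hm; exact hs (this.mpr (Or.inl hm))
              · intro hm; exact hs (this.mpr (Or.inr hm))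
            obtain ⟨t2, ht2⟩ := h1
            have harg1 : ∃ t2', st.1 ++ [v] = order ++ t2' := ⟨t2 ++ [v], by rw [ht2]; simp⟩
            have harg2 : (st.1 ++ [v]).Nodup := by
              rw [List.nodup_append]
              refine ⟨h2, by simp, ?_⟩
              intro a ha b hb hab
              have : b = v := by simpa using hb
              exact hvnew.1 (this ▸ hab ▸ ha)
            have harg3 : ∀ x ∈ st.1 ++ [v], 0 ≤ x ∧ x < N := by
              intro x hx
              rcases List.mem_append.mp hx with hx' | hx'
              · exact h3 x hx'
              · have : x = v := by simpa using hx'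
                exact this ▸ hvr
            have harg4 : ∀ x ∈ st.1 ++ [v], x ∉ V := by
              intro x hx
              rcases List.mem_append.mp hx with hx' | hx'
              · exact h4 x hx'
              · have : x = v := by simpa using hx'
                exact this ▸ hvnew.2
            have harg5 : (st.2.set v.toNat true).length = N.toNat := by simp [h5]
            have harg6 : ∀ x : Int, 0 ≤ x → x < N →
                ((st.2.set v.toNat true).getD x.toNat false = true ↔ (x ∈ st.1 ++ [v] ∨ x ∈ V)) := by
              intro x hx1 hx2
              have hxl : x.toNat < st.2.length := by omega
              by_cases hxv : x = v
              · subst hxv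
                rw [boolListGetD_set st.2 x.toNat x.toNat true false (by omega), if_pos rfl]
                simp
              · rw [boolListGetD_set st.2 v.toNat x.toNat true false (by omega),
                  if_neg (by omega)]
                rw [h6 x hx1 hx2]
                constructor
                · rintro (hm | hm)
                  · exact Or.inl (List.mem_append_left _ hm)
                  · exact Or.inr hm
                · rintro (hm | hm)
                  · rcases List.mem_append.mp hm with hm' | hm'
                    · exact Or.inl hm'
                    · exact absurd (by simpa using hm') hxv
                  · exact Or.inr hm
            obtain ⟨hh1, hmono, hh2, hh3, hh4, hh5, hh6, hall⟩ :=
              ihl (st.1 ++ [v], st.2.set v.toNat true) (fun w hw => hl w (by simp [hw]))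
                harg1 harg2 harg3 harg4 harg5 harg6
            refine ⟨hh1, fun x hx => hmono x (List.mem_append_left _ hx), hh2, hh3, hh4, hh5, hh6,
              fun w hw => ?_⟩
            rcases List.mem_cons.mp hw with hw' | hw'
            · subst hw'; exact hmono w (List.mem_append_right _ (by simp))
            · exact hall w hw'
      obtain ⟨hh1, hmono, hh2, hh3, hh4, hh5, hh6, hall⟩ :=
        fold_spec (adj.getD (order.getD head 0).toNat []) (order, seen)
          (fun v hv => hv) ⟨[], by simp⟩ hnd hor hoV hsl hsiff
      set st' := (adj.getD (order.getD head 0).toNat []).foldl (fun (os : List Int × List Bool) v =>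
          if os.2.getD v.toNat false then os
          else (os.1 ++ [v], os.2.set v.toNat true)) (order, seen) with hst'
      obtain ⟨t2, ht2⟩ := hh1
      obtain ⟨tail3, hr1, hr2, hr3, hr4, hr5, hr6, hr7⟩ :=
        ihf st'.1 (head + 1) st'.2 (ht2 ▸ hh2) (ht2 ▸ hh3) (ht2 ▸ hh4) hh5 hh6
          (by rw [ht2]; simp only [List.length_append]; omega)
          (by
            intro j hj v hv
            by_cases hjh : j < head
            · have hgd : st'.1.getD j 0 = order.getD j 0 := by
                rw [ht2, getD_append_left order t2 j 0 (by omega)]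
              rw [hgd] at hv
              have := hproc j hjh v hv
              rw [ht2]
              exact List.mem_append_left _ this
            · have hjh' : j = head := by omega
              subst hjh'
              have hgd : st'.1.getD j 0 = order.getD j 0 := by
                rw [ht2, getD_append_left order t2 j 0 (by omega)]
              rw [hgd] at hv
              exact hall v hv)
          (by omega)
      refine ⟨t2 ++ tail3, ?_, ?_, ?_, ?_, hr5, ?_, ?_⟩
      · rw [hr1, ht2]; simp
      · rw [← List.append_assoc, ← ht2]; exact hr2
      · rw [← List.append_assoc, ← ht2]; exact hr3
      · rw [← List.append_assoc, ← ht2]; exact hr4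
      · rw [← List.append_assoc, ← ht2]; exact hr6
      · rw [← List.append_assoc, ← ht2]; exact hr7


theorem sigmaArr_replicate (n : Nat) : sigmaArr (List.replicate n (-1 : Int)) = fun _ => none := by
  funext v
  unfold sigmaArr
  have : (List.replicate n (-1 : Int)).getD v.toNat (-1) = -1 := by
    simp only [List.getD, List.getElem?_replicate]
    split <;> simp
  rw [this, if_pos rfl]

theorem loopB (adj : List (List Int)) (N : Int)
    (hadjr : ∀ u v : Int, 0 ≤ u → u < N → v ∈ adj.getD u.toNat [] → 0 ≤ v ∧ v < N)
    (hsymB : ∀ u v : Int, 0 ≤ u → u < N → 0 ≤ v → v < N →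
      (v ∈ adj.getD u.toNat [] ↔ u ∈ adj.getD v.toNat [])) :
    ∀ (ℓ : List Int) (seen : List Bool) (r : Int) (L : List Int),
      (∀ x ∈ ℓ, 0 ≤ x ∧ x < N) →
      L.Nodup → (∀ x ∈ L, 0 ≤ x ∧ x < N) →
      (∀ w ∈ L, ∀ v ∈ adj.getD w.toNat [], v ∈ L) →
      seen.length = N.toNat →
      (∀ x : Int, 0 ≤ x → x < N → (seen.getD x.toNat false = true ↔ x ∈ L)) →
      r = sc (fun v => adj.getD v.toNat []) ([0, 1, 2] : List Int) L (fun _ => none) →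
      ∃ L', (ℓ.foldl (fun (st : List Bool × Int) s =>
          if st.1.getD s.toNat false then st
          else
            let os := bfsB adj (N.toNat + 1) [s] 0 (st.1.set s.toNat true)
            (os.2, st.2 * countB adj os.1 (os.1.length + 1) 0 (List.replicate N.toNat (-1))))
          (seen, r)).2 =
          sc (fun v => adj.getD v.toNat []) ([0, 1, 2] : List Int) L' (fun _ => none) ∧
        L'.Nodup ∧ (∀ x ∈ L', 0 ≤ x ∧ x < N) ∧
        (∀ w ∈ L', ∀ v ∈ adj.getD w.toNat [], v ∈ L') ∧
        (∀ x ∈ ℓ, x ∈ L') ∧ (∀ x ∈ L, x ∈ L') := by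
  intro ℓ
  induction ℓ with
  | nil =>
    intro seen r L _ h1 h2 h3 _ _ h6
    exact ⟨L, h6 ▸ rfl, h1, h2, h3, by simp, fun x hx => hx⟩
  | cons s ℓ ihl =>
    intro seen r L hlr hnd hLr hLcl hsl hsiff hr
    simp only [List.foldl_cons]
    have hsr : 0 ≤ s ∧ s < N := hlr s (by simp)
    by_cases hc : seen.getD s.toNat false
    · rw [if_pos hc]
      obtain ⟨L', h1, h2, h3, h4, h5, h6⟩ :=
        ihl seen r L (fun x hx => hlr x (by simp [hx])) hnd hLr hLcl hsl hsiff hr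
      refine ⟨L', h1, h2, h3, h4, fun x hx => ?_, h6⟩
      rcases List.mem_cons.mp hx with hx' | hx'
      · subst hx'
        exact h6 x ((hsiff x hsr.1 hsr.2).mp hc)
      · exact h5 x hx'
    · rw [if_neg hc]
      have hsnL : s ∉ L := fun hm => hc ((hsiff s hsr.1 hsr.2).mpr hm)
      have hsiff' : ∀ x : Int, 0 ≤ x → x < N →
          ((seen.set s.toNat true).getD x.toNat false = true ↔ (x ∈ ([s] : List Int) ∨ x ∈ L)) := by
        intro x hx1 hx2
        by_cases hxs : x = s
        · subst hxs
          rw [boolListGetD_set seen x.toNat x.toNat true false (by omega), if_pos rfl]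
          simp
        · rw [boolListGetD_set seen s.toNat x.toNat true false (by omega), if_neg (by omega)]
          rw [hsiff x hx1 hx2]
          simp [hxs]
      obtain ⟨tail2, hb1, hb2, hb3, hb4, hb5, hb6, hb7⟩ :=
        bfsB_spec adj N hadjr hsymB L hLcl hLr (N.toNat + 1) [s] 0 (seen.set s.toNat true)
          (by simp) (by simpa using hsr) (by simpa using hsnL) (by simpa using hsl) hsiff'
          (by simp) (by omega) (by omega)
      have hdisj : ∀ w ∈ ([s] ++ tail2 : List Int), w ∉ L := hb4
      have hL'nd : (L ++ ([s] ++ tail2)).Nodup := by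
        rw [List.nodup_append]
        refine ⟨hnd, hb2, ?_⟩
        intro a ha b hb hab
        exact hdisj b hb (hab ▸ ha)
      have hcount : countB adj (bfsB adj (N.toNat + 1) [s] 0 (seen.set s.toNat true)).1
          ((bfsB adj (N.toNat + 1) [s] 0 (seen.set s.toNat true)).1.length + 1) 0
          (List.replicate N.toNat (-1)) =
          sc (fun v => adj.getD v.toNat []) ([0, 1, 2] : List Int) ([s] ++ tail2) (fun _ => none) := by
        rw [hb1]
        rw [countB_eq_sc adj N ([s] ++ tail2) hadjr hb3 (([s] ++ tail2).length + 1) 0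
          (List.replicate N.toNat (-1)) (by simp) (by omega)]
        rw [List.drop_zero, sigmaArr_replicate]
      have hsplit : sc (fun v => adj.getD v.toNat []) ([0, 1, 2] : List Int)
          (L ++ ([s] ++ tail2)) (fun _ => none) =
          sc (fun v => adj.getD v.toNat []) ([0, 1, 2] : List Int) L (fun _ => none) *
          sc (fun v => adj.getD v.toNat []) ([0, 1, 2] : List Int) ([s] ++ tail2) (fun _ => none) := by
        apply sc_split
        intro w hw v hv hvL
        exact hdisj v (hb7 w hw v hv) hvL
      obtain ⟨L', h1, h2, h3, h4, h5, h6⟩ := ihl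
        (bfsB adj (N.toNat + 1) [s] 0 (seen.set s.toNat true)).2
        (r * countB adj (bfsB adj (N.toNat + 1) [s] 0 (seen.set s.toNat true)).1
          ((bfsB adj (N.toNat + 1) [s] 0 (seen.set s.toNat true)).1.length + 1) 0
          (List.replicate N.toNat (-1)))
        (L ++ ([s] ++ tail2))
        (fun x hx => hlr x (by simp [hx])) hL'nd
        (fun x hx => (List.mem_append.mp hx).elim (hLr x) (hb3 x))
        (fun w hw v hv => by
          rcases List.mem_append.mp hw with hw' | hw'
          · exact List.mem_append_left _ (hLcl w hw' v hv)
          · exact List.mem_append_right _ (hb7 w hw' v hv))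
        hb5
        (fun x hx1 hx2 => by
          rw [hb6 x hx1 hx2]
          constructor
          · rintro (hm | hm)
            · exact List.mem_append_right _ hm
            · exact List.mem_append_left _ hm
          · intro hm
            rcases List.mem_append.mp hm with hm' | hm'
            · exact Or.inr hm'
            · exact Or.inl hm')
        (by rw [hcount, hr, ← hsplit])
      refine ⟨L', h1, h2, h3, h4, fun x hx => ?_, fun x hx => h6 x (List.mem_append_left _ hx)⟩
      rcases List.mem_cons.mp hx with hx' | hx'
      · subst hx'; exact h6 x (List.mem_append_right _ (by simp))
      · exact h5 x hx'

theorem ansB_eq (N M : Int) (edges : List (Int × Int))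
    (hpre : ∀ p ∈ edges, 0 ≤ p.1 ∧ p.1 < N ∧ 0 ≤ p.2 ∧ p.2 < N) :
    ans_fast_alt N M edges = sc (fun v => (buildNbA N edges).getD v [])
      ([0, 1, 2] : List Int) (PySem.List.pyRange 0 N 1) (fun _ => none) := by
  obtain ⟨hlen, hagree, hout, hsym, hrange⟩ := nbInv_build N edges hpre
  have hadjr : ∀ u v : Int, 0 ≤ u → u < N → v ∈ (buildAdjB N edges).getD u.toNat [] →
      0 ≤ v ∧ v < N := by
    intro u v h1 h2 hv
    rw [← hagree u h1 h2] at hv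
    have := hrange u v hv
    omega
  have hsymB : ∀ u v : Int, 0 ≤ u → u < N → 0 ≤ v → v < N →
      (v ∈ (buildAdjB N edges).getD u.toNat [] ↔ u ∈ (buildAdjB N edges).getD v.toNat []) := by
    intro u v h1 h2 h3 h4
    rw [← hagree u h1 h2, ← hagree v h3 h4]
    exact hsym u v
  have hseen0 : ∀ x : Int, 0 ≤ x → x < N →
      ((List.replicate (max N 0).toNat false).getD x.toNat false = true ↔ x ∈ ([] : List Int)) := by
    intro x _ _
    have : (List.replicate (max N 0).toNat false).getD x.toNat false = false := by
      simp only [List.getD, List.getElem?_replicate]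
      split <;> simp
    simp [this]
  obtain ⟨L', h1, h2, h3, _, h5, _⟩ := loopB (buildAdjB N edges) N hadjr hsymB
    (PySem.List.pyRange 0 N 1) (List.replicate (max N 0).toNat false) 1 []
    (fun x hx => by rw [PySem.List.mem_pyRange_one] at hx; omega)
    (by simp) (by simp) (by simp) (by simp; omega) hseen0 rfl
  have hgoal : ans_fast_alt N M edges = sc (fun v => (buildAdjB N edges).getD v.toNat [])
      ([0, 1, 2] : List Int) L' (fun _ => none) := h1
  rw [hgoal]
  rw [sc_congr_nbr (fun v => (buildAdjB N edges).getD v.toNat [])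
    (fun v => (buildNbA N edges).getD v []) _ L' _
    (fun u hu => ((hagree u (h3 u hu).1 (h3 u hu).2).symm))]
  refine sc_perm _ _ hsym ?_ _ h2 (fun _ _ => rfl)
  rw [List.perm_ext_iff_of_nodup h2 (pyRange_nodup N)]
  intro x
  rw [PySem.List.mem_pyRange_one]
  constructor
  · intro hx; have := h3 x hx; omega
  · intro hx
    exact h5 x (by rw [PySem.List.mem_pyRange_one]; omega)

def gCI : Char → Int :=
  fun c => if c = 'R' then 0 else if c = 'G' then 1 else if c = 'B' then 2 else (c.toNat : Int) + 3

theorem gCI_inj : Function.Injective gCI := by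
  intro a b h
  unfold gCI at h
  have htoNat : ∀ x y : Char, x.toNat = y.toNat → x = y := by
    intro x y hxy
    exact Char.ext (UInt32.toNat_inj.mp hxy)
  by_cases ha1 : a = 'R' <;> by_cases hb1 : b = 'R' <;>
    by_cases ha2 : a = 'G' <;> by_cases hb2 : b = 'G' <;>
      by_cases ha3 : a = 'B' <;> by_cases hb3 : b = 'B' <;>
        simp [ha1, hb1, ha2, hb2, ha3, hb3] at h ⊢ <;>
          first
          | (subst ha1; rfl)
          | (exact htoNat a b (by omega))
          | omega
          | (exfalso; have := a.toNat; omega)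

theorem ans_fast_spec : Claim_equal_ans_fast := by
  intro N M edges _ hpre
  unfold Spec_ans_fast
  rw [ansA_eq N M edges hpre, ansB_eq N M edges hpre]
  have hmap : ("RGB".toList).map gCI = ([0, 1, 2] : List Int) := by decide
  have hm := sc_map (fun v => (buildNbA N edges).getD v []) ("RGB".toList) gCI gCI_inj
    (PySem.List.pyRange 0 N 1) (fun _ => none)
  rw [hmap] at hm
  exact hm.symm
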